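-- pv_equiv track=rewrite | github.com/Maho-Yoshino/School_Notes | 2023-2024/Programozas/2024-02-28-utolagos/fel4.py | rovid
-- ===== SOURCE A (Python) =====
-- def rovid(szavak:list):
-- 	szo = None
-- 	hossz = 2**64
-- 	for i in szavak:
-- 		if len(i)<hossz:
-- 			hossz=len(i)
-- 			szo=i
-- 	return szo
-- ===== SOURCE B (Python) =====
-- def rovid(szavak: list):
--     if not szavak:
--         return None
--     return sorted(szavak, key=len)[0]
-- ===== Notes on version B (the rewrite author's own statement) =====
-- stated objective: idiomatic
-- what changed: Replaces the running-minimum scan with sentinel 2**64 by an empty-guard plus sorted(szavak, key=len)[0]; Python's stable sort makes element 0 the first shortest word, exactly A's tie rule.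
import Mathlib
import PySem

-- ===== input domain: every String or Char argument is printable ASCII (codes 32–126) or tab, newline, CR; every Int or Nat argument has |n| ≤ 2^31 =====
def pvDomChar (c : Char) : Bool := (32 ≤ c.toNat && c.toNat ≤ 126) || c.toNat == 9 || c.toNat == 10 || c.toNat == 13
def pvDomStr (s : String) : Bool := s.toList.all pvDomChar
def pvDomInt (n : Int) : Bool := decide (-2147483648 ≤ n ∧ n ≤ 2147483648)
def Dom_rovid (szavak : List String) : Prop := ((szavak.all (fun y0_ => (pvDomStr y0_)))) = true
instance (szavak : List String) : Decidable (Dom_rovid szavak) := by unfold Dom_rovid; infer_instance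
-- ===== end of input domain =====

-- B replaces A's running-minimum scan (sentinel 2**64) with an empty-guard plus a stable
-- sort by length and taking element 0 — same first-shortest-word result, different strategy.

-- ===== PORT A =====
def rovid (szavak : List String) : Option String :=
  (szavak.foldl
    (fun st i => if PySem.Str.len i < st.2 then (some i, PySem.Str.len i) else st)
    ((none : Option String), (2 : Int) ^ 64)).1

-- ===== PORT B =====
def rovid_alt (szavak : List String) : Option String :=
  match szavak with
  | [] => none
  | _ :: _ => (PySem.List.sorted szavak (fun s => PySem.Str.len s) false).head?

-- ===== PRECONDITION & SPEC =====
-- Pre_ excludes lists containing a word of length ≥ 2^64: A's sentinel 2**64 would never let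
-- such a word be selected. No such string is representable in a running Python process, so
-- Pre_ excludes no input A can actually be run on.
def Pre_rovid (szavak : List String) : Prop :=
  ∀ s ∈ szavak, PySem.Str.len s < (2 : Int) ^ 64
instance (szavak : List String) : Decidable (Pre_rovid szavak) := by unfold Pre_rovid; infer_instance
def pvWitness_rovid : List String := (["alma", "ab", "fa"])

def Spec_rovid (szavak : List String) (out : Option String) : Prop := out = rovid_alt szavak
instance (szavak : List String) (out : Option String) : Decidable (Spec_rovid szavak out) := by unfold Spec_rovid; infer_instance

-- ===== CLAIM (what is proved, stated in full; the proofs are below) =====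
def Claim_equal_rovid : Prop := ∀ (szavak : List String), Dom_rovid szavak → Pre_rovid szavak → Spec_rovid szavak (rovid szavak)

-- ===== LEMMAS AND PROOFS =====

-- the common "first strictly-shorter word wins" left fold both sides reduce to
def pvG (w : String) (xs : List String) : String :=
  xs.foldl (fun cur x => if PySem.Str.len x < PySem.Str.len cur then x else cur) w

-- A's loop, once the first word is loaded, computes pvG
theorem pvA_loop (xs : List String) (w : String) :
    xs.foldl
      (fun st i => if PySem.Str.len i < st.2 then (some i, PySem.Str.len i) else st)
      (some w, PySem.Str.len w)
      = (some (pvG w xs), PySem.Str.len (pvG w xs)) := by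
  induction xs generalizing w with
  | nil => simp [pvG]
  | cons x xs ih =>
    simp only [pvG, List.foldl_cons, PySem.Str.len, Nat.cast_lt]
    split_ifs with h
    · simpa [pvG, PySem.Str.len] using ih x
    · simpa [pvG, PySem.Str.len] using ih w

-- the head of the stable insertion-sort fold, for a non-empty accumulator, is pvG
theorem pvB_loop (xs : List String) (h : String) (t : List String) :
    ∃ t', (xs.foldl
        (fun acc x => PySem.List.insertBy
          (fun a b => decide (PySem.Str.len a < PySem.Str.len b)) x acc) (h :: t))
      = pvG h xs :: t' := by
  induction xs generalizing h t with
  | nil => exact ⟨t, by simp [pvG]⟩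
  | cons x xs ih =>
    simp only [pvG, List.foldl_cons, PySem.List.insertBy, PySem.Str.len,
      decide_eq_true_eq, Nat.cast_lt]
    split_ifs with hx
    · simpa [pvG, PySem.Str.len] using ih x (h :: t)
    · simpa [pvG, PySem.Str.len] using ih h (PySem.List.insertBy
        (fun a b => decide (PySem.Str.len a < PySem.Str.len b)) x t)

-- ===== VERDICT (by name: the statement is the Claim_ definition above) =====
theorem rovid_spec : Claim_equal_rovid := by
  intro szavak _ hpre
  unfold Spec_rovid rovid rovid_alt
  cases szavak with
  | nil => rfl
  | cons x xs =>
    have hx : PySem.Str.len x < (2 : Int) ^ 64 := hpre x (by simp)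
    rw [PySem.List.sorted_eq_foldl_insertBy]
    obtain ⟨t', ht'⟩ := pvB_loop xs x []
    simp only [PySem.List.insertBy, List.foldl] at ht' ⊢
    rw [if_pos hx, pvA_loop, ht']
    rfl
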